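-- pv_equiv track=rewrite | github.com/Syngester/SailorPieceSetCalculator | SailorSetCalc.py | Sukuna
-- ===== SOURCE A (Python) =====
-- def Sukuna(CursedFinger, DismantleFang, CrimsonHeart):
--     sets = 0
--     while True:
--         if(DismantleFang >= 3 and CrimsonHeart >= 1 and CursedFinger >= 6):
--             DismantleFang -= 3
--             CrimsonHeart -= 1
--             CursedFinger -= 6
--             sets += 1
--         else:
--             break
--     return sets
-- ===== SOURCE B (Python) =====
-- def Sukuna(CursedFinger, DismantleFang, CrimsonHeart):
--     return max(0, min(CursedFinger // 6, DismantleFang // 3, CrimsonHeart))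
-- ===== Notes on version B (the rewrite author's own statement) =====
-- stated objective: faster
-- what changed: Replaces the repeated-subtraction while loop with a closed-form max(0, min(CursedFinger//6, DismantleFang//3, CrimsonHeart)).
import Mathlib
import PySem

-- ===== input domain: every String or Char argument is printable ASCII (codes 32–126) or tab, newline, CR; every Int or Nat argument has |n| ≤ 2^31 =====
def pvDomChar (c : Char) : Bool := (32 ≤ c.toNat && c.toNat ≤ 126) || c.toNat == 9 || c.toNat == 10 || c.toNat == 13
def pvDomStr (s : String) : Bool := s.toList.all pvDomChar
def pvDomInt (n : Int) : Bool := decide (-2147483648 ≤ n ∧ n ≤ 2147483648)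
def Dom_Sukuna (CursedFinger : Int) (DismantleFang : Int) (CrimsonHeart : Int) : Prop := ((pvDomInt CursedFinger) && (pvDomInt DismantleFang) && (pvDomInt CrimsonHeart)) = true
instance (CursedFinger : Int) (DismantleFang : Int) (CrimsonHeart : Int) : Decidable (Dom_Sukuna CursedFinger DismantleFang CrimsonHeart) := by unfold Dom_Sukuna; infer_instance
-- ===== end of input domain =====

-- B replaces A's repeated-subtraction loop with the closed form max(0, min(cf//6, df//3, ch)) (O(1) vs O(result)).


-- ===== PORT A =====
def SukunaLoop (CursedFinger : Int) (DismantleFang : Int) (CrimsonHeart : Int) (sets : Int) : Int :=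
  if DismantleFang ≥ 3 ∧ CrimsonHeart ≥ 1 ∧ CursedFinger ≥ 6 then
    SukunaLoop (CursedFinger - 6) (DismantleFang - 3) (CrimsonHeart - 1) (sets + 1)
  else
    sets
termination_by CrimsonHeart.toNat
decreasing_by omega

def Sukuna (CursedFinger : Int) (DismantleFang : Int) (CrimsonHeart : Int) : Int :=
  SukunaLoop CursedFinger DismantleFang CrimsonHeart 0

-- ===== PORT B =====
def Sukuna_alt (CursedFinger : Int) (DismantleFang : Int) (CrimsonHeart : Int) : Int :=
  max 0 (min (min (PySem.Int.floordiv CursedFinger 6) (PySem.Int.floordiv DismantleFang 3)) CrimsonHeart)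

-- ===== PRECONDITION & SPEC =====
def Spec_Sukuna (CursedFinger : Int) (DismantleFang : Int) (CrimsonHeart : Int) (out : Int) : Prop := out = Sukuna_alt CursedFinger DismantleFang CrimsonHeart
instance (CursedFinger : Int) (DismantleFang : Int) (CrimsonHeart : Int) (out : Int) : Decidable (Spec_Sukuna CursedFinger DismantleFang CrimsonHeart out) := by unfold Spec_Sukuna; infer_instance

-- ===== CLAIM (what is proved, stated in full; the proofs are below) =====
def Claim_equal_Sukuna : Prop := ∀ (CursedFinger : Int) (DismantleFang : Int) (CrimsonHeart : Int), Dom_Sukuna CursedFinger DismantleFang CrimsonHeart → Spec_Sukuna CursedFinger DismantleFang CrimsonHeart (Sukuna CursedFinger DismantleFang CrimsonHeart)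

-- ===== LEMMAS AND PROOFS =====

-- ===== VERDICT (by name: the statement is the Claim_ definition above) =====
lemma sukunaLoop_closed (cf df ch sets : Int) :
    SukunaLoop cf df ch sets = sets + max 0 (min (min (PySem.Int.floordiv cf 6) (PySem.Int.floordiv df 3)) ch) := by
  induction cf, df, ch, sets using SukunaLoop.induct with
  | case1 cf df ch sets h ih =>
    rw [SukunaLoop, if_pos h, ih]
    rw [PySem.Int.floordiv_eq_ediv_of_pos (a := cf) (by norm_num),
        PySem.Int.floordiv_eq_ediv_of_pos (a := df) (by norm_num),
        PySem.Int.floordiv_eq_ediv_of_pos (a := cf - 6) (by norm_num),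
        PySem.Int.floordiv_eq_ediv_of_pos (a := df - 3) (by norm_num)]
    omega
  | case2 cf df ch sets h =>
    rw [SukunaLoop, if_neg h]
    rw [PySem.Int.floordiv_eq_ediv_of_pos (a := cf) (by norm_num),
        PySem.Int.floordiv_eq_ediv_of_pos (a := df) (by norm_num)]
    omega

theorem Sukuna_spec : Claim_equal_Sukuna := by
  intro cf df ch _
  unfold Spec_Sukuna Sukuna Sukuna_alt
  rw [sukunaLoop_closed]
  ring
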